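-- pv_equiv track=rewrite | github.com/fpiesche/bub-n-bros | bubbob/pixmap.py | makebkgnd
-- ===== SOURCE A (Python) =====
-- def makebkgnd(w, h, data):
--     scanline = 3*w
--     result = []
--     for position in range(0, scanline*h, scanline):
--         line = []
--         for p in range(position, position+scanline, 3):
--             line.append(2 * (chr(data[p] >> 3) +
--                              chr(data[p+1] >> 3) +
--                              chr(data[p+2] >> 3)))
--         line = ''.join(line)
--         result.append(line)
--         result.append(line)
--     return w*2, h*2, ''.join([str(line) for line in result])
-- ===== SOURCE B (Python) =====
-- def makebkgnd(w, h, data):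
--     if w <= 0 or h <= 0:
--         return w * 2, h * 2, ''
--     s = ''.join(chr(b >> 3) for b in data[:3 * w * h])
--     doubled = ''.join(s[i:i + 3] * 2 for i in range(0, len(s), 3))
--     W = 6 * w
--     return w * 2, h * 2, ''.join(doubled[i:i + W] * 2 for i in range(0, len(doubled), W))
-- ===== Notes on version B (the rewrite author's own statement) =====
-- stated objective: simpler
-- what changed: A's two nested per-line/per-pixel index loops with list accumulators are replaced by three flat passes: flatten all read bytes to chars, double every 3-char pixel, then double every 6*w-char line.
import Mathlib
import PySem

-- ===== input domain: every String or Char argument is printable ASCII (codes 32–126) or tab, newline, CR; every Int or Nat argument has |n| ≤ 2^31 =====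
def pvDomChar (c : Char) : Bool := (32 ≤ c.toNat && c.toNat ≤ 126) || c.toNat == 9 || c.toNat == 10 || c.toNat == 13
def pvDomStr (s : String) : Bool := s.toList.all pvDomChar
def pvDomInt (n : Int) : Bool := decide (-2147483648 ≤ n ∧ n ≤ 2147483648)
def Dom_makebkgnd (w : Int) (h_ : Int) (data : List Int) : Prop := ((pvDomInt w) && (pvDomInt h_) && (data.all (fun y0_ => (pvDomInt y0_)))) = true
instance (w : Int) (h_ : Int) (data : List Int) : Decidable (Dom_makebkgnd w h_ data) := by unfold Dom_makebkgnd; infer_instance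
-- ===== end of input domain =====

-- B replaces A's two nested index loops by three flat passes (flatten bytes, double pixels, double lines); objective: simpler decomposition, same cost.


-- ===== PORT A =====
-- chr(n): exact for 0 ≤ n ≤ 0x10FFFF outside the surrogate range (guaranteed by Pre_)
def pyChr (n : Int) : Char := Char.ofNat n.toNat

-- literal transliteration of A: two nested index loops appending doubled pixels / doubled lines
-- (str(line) on a str is the identity and is dropped; data[p] is ported with pyGetD, in range under Pre_)
def makebkgnd (w : Int) (h_ : Int) (data : List Int) : Int × Int × String :=
  let scanline := 3 * w
  let result : List (List Char) :=
    (PySem.List.pyRange 0 (scanline * h_) scanline).foldl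
      (fun result position =>
        let line : List (List Char) :=
          (PySem.List.pyRange position (position + scanline) 3).foldl
            (fun line p =>
              let s := [pyChr (PySem.List.pyGetD data p 0 >>> (3 : Nat)),
                        pyChr (PySem.List.pyGetD data (p + 1) 0 >>> (3 : Nat)),
                        pyChr (PySem.List.pyGetD data (p + 2) 0 >>> (3 : Nat))]
              line ++ [s ++ s]) []
        let line := line.flatten
        result ++ [line, line]) []
  (w * 2, h_ * 2, String.ofList result.flatten)

-- ===== PORT B =====
-- literal transliteration of Source B: guard, flatten pass, pixel-doubling pass, line-doubling pass
def makebkgnd_alt (w : Int) (h_ : Int) (data : List Int) : Int × Int × String :=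
  if w ≤ 0 ∨ h_ ≤ 0 then (w * 2, h_ * 2, "") else
  let s : List Char := (PySem.List.slice data none (some (3 * w * h_))).map
    (fun b : Int => pyChr (b >>> (3 : Nat)))
  let doubled : List Char :=
    ((PySem.List.pyRange 0 (s.length : Int) 3).map
      (fun i => let t := PySem.List.slice s (some i) (some (i + 3)); t ++ t)).flatten
  let W := 6 * w
  let out : List Char :=
    ((PySem.List.pyRange 0 (doubled.length : Int) W).map
      (fun i => let t := PySem.List.slice doubled (some i) (some (i + W)); t ++ t)).flatten
  (w * 2, h_ * 2, String.ofList out)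

-- ===== PRECONDITION & SPEC =====
-- Pre_ excludes only inputs where A raises (w = 0: range step 0, ValueError; data shorter than
-- 3*w*h: IndexError; a read byte negative or ≥ 0x880000: chr ValueError) plus one narrowing it
-- states: read bytes whose chr(b >> 3) falls in the surrogate range U+D800..U+DFFF — A returns a
-- surrogate-bearing str there, which is not a representable Lean Char.
def Pre_makebkgnd (w : Int) (h_ : Int) (data : List Int) : Prop :=
  w ≠ 0 ∧ (0 < w → 0 < h_ →
    3 * w * h_ ≤ (data.length : Int) ∧
    ∀ b ∈ data.take (3 * w * h_).toNat,
      0 ≤ b ∧ b < 8912896 ∧ ¬(55296 ≤ b >>> (3 : Nat) ∧ b >>> (3 : Nat) ≤ 57343))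
instance (w : Int) (h_ : Int) (data : List Int) : Decidable (Pre_makebkgnd w h_ data) := by
  unfold Pre_makebkgnd; infer_instance

def pvWitness_makebkgnd : Int × Int × List Int := (1, 1, [256, 264, 272])

def Spec_makebkgnd (w : Int) (h_ : Int) (data : List Int) (out : Int × Int × String) : Prop := out = makebkgnd_alt w h_ data
instance (w : Int) (h_ : Int) (data : List Int) (out : Int × Int × String) : Decidable (Spec_makebkgnd w h_ data out) := by unfold Spec_makebkgnd; infer_instance

-- ===== CLAIM (what is proved, stated in full; the proofs are below) =====
def Claim_equal_makebkgnd : Prop := ∀ (w : Int) (h_ : Int) (data : List Int), Dom_makebkgnd w h_ data → Pre_makebkgnd w h_ data → Spec_makebkgnd w h_ data (makebkgnd w h_ data)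

-- ===== LEMMAS AND PROOFS =====

-- the canonical value both ports are reduced to (pre = the 3*w*h bytes actually read)
def pvT (pre : List Int) (k : Nat) : List Char :=
  ((pre.drop (3 * k)).take 3).map (fun b : Int => pyChr (b >>> (3 : Nat)))
def pvChunk (pre : List Int) (k : Nat) : List Char := pvT pre k ++ pvT pre k
def pvRow (pre : List Int) (w' r : Nat) : List Char :=
  (List.range' (w' * r) w').flatMap (pvChunk pre)
def pvCanon (w' h' : Nat) (pre : List Int) : List Char :=
  (List.range h').flatMap (fun r => pvRow pre w' r ++ pvRow pre w' r)

-- range(0, s*M, s) for positive s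
theorem pvRange_step (s' M : Nat) (hs : 0 < s') :
    PySem.List.pyRange 0 ((s' * M : Nat) : Int) ((s' : Nat) : Int) =
      (List.range M).map (fun k : Nat => ((s' : Int)) * (k : Int)) := by
  rw [PySem.List.pyRange_of_pos _ _ (by exact_mod_cast hs)]
  rcases Nat.eq_zero_or_pos M with hM | hM
  · subst hM; simp
  · have hlt : (0 : Int) < ((s' * M : Nat) : Int) := by
      have : 0 < s' * M := Nat.mul_pos hs hM
      exact_mod_cast this
    rw [if_pos hlt]
    have hnum : ((s' * M : Nat) : Int) - 0 + (s' : Int) - 1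
        = ((s' : Int) - 1) + (M : Int) * (s' : Int) := by push_cast; ring
    rw [hnum, Int.add_mul_ediv_right _ _ (by exact_mod_cast hs.ne')]
    rw [Int.ediv_eq_zero_of_lt (by omega) (by omega)]
    simp

-- range(pos, pos + 3*w, 3) for positive w
theorem pvRange_inner (pos : Int) (w' : Nat) (hw : 0 < w') :
    PySem.List.pyRange pos (pos + 3 * (w' : Int)) 3 =
      (List.range w').map (fun c : Nat => pos + 3 * (c : Int)) := by
  rw [PySem.List.pyRange_of_pos _ _ (by norm_num : (0:Int) < 3)]
  have hlt : pos < pos + 3 * (w' : Int) := by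
    have : (0 : Int) < (w' : Int) := by exact_mod_cast hw
    omega
  rw [if_pos hlt]
  have hnum : pos + 3 * (w' : Int) - pos + 3 - 1 = 2 + (w' : Int) * 3 := by ring
  rw [hnum, Int.add_mul_ediv_right _ _ (by norm_num : (3:Int) ≠ 0)]
  norm_num

-- range(pos, pos + 3*w, 3) is empty for negative w
theorem pvRange_inner_neg (pos w : Int) (hw : w < 0) :
    PySem.List.pyRange pos (pos + 3 * w) 3 = [] := by
  rw [PySem.List.pyRange_of_pos _ _ (by norm_num : (0:Int) < 3)]
  have : ¬ (pos < pos + 3 * w) := by omega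
  simp [this]

-- the three elements of a 3-element window
theorem pvTake3 {α : Type} (xs : List α) (j : Nat) (d : α) (hj : 3 * j + 3 ≤ xs.length) :
    (xs.drop (3 * j)).take 3 =
      [xs.getD (3 * j) d, xs.getD (3 * j + 1) d, xs.getD (3 * j + 2) d] := by
  rw [List.drop_eq_getElem_cons (by omega), List.drop_eq_getElem_cons (l := xs) (by omega),
      List.drop_eq_getElem_cons (l := xs) (by omega)]
  simp only [List.take_succ_cons, List.take_zero]
  rw [List.getD_eq_getElem _ _ (by omega : 3 * j < xs.length),
      List.getD_eq_getElem _ _ (by omega : 3 * j + 1 < xs.length),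
      List.getD_eq_getElem _ _ (by omega : 3 * j + 2 < xs.length)]

-- a flatMap of constant-length pieces has length c * (number of pieces)
theorem pvFlatMap_len {α : Type} (c : Nat) (l : List Nat) (piece : Nat → List α)
    (h : ∀ i ∈ l, (piece i).length = c) : (l.flatMap piece).length = c * l.length := by
  induction l with
  | nil => simp
  | cons x t ih =>
      simp only [List.flatMap_cons, List.length_append, h x (by simp),
        ih (fun i hi => h i (by simp [hi])), List.length_cons]
      ring

theorem pvT_len (pre : List Int) (k : Nat) (hk : 3 * k + 3 ≤ pre.length) :
    (pvT pre k).length = 3 := by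
  simp [pvT]; omega

theorem pvChunk_len (pre : List Int) (k : Nat) (hk : 3 * k + 3 ≤ pre.length) :
    (pvChunk pre k).length = 6 := by
  simp [pvChunk, pvT_len pre k hk]

theorem pvApp_congr {α : Type} {x y : List α} (h : x = y) : x ++ x = y ++ y := by rw [h]

theorem pvFlatten_pairs {α β : Type} (l : List α) (f : α → List β) :
    (l.flatMap (fun y => [f y, f y])).flatten = l.flatMap (fun y => f y ++ f y) := by
  induction l with
  | nil => simp
  | cons x t ih => simp [ih]

-- one doubled pixel, read through pyGetD, equals pvT of the truncated buffer
theorem pvPix_eq (data : List Int) (N j : Nat) (hj : 3 * j + 3 ≤ N) (hN : N ≤ data.length) :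
    [pyChr (PySem.List.pyGetD data ((3 * j : Nat) : Int) 0 >>> (3 : Nat)),
     pyChr (PySem.List.pyGetD data (((3 * j : Nat) : Int) + 1) 0 >>> (3 : Nat)),
     pyChr (PySem.List.pyGetD data (((3 * j : Nat) : Int) + 2) 0 >>> (3 : Nat))]
      = pvT (data.take N) j := by
  have hpre : (data.take N).length = N := List.length_take_of_le hN
  have e1 : ((3 * j : Nat) : Int) + 1 = ((3 * j + 1 : Nat) : Int) := by push_cast; ring
  have e2 : ((3 * j : Nat) : Int) + 2 = ((3 * j + 2 : Nat) : Int) := by push_cast; ring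
  rw [e1, e2, PySem.List.pyGetD_natCast, PySem.List.pyGetD_natCast, PySem.List.pyGetD_natCast]
  rw [pvT, pvTake3 _ j 0 (by omega)]
  simp only [List.map_cons, List.map_nil]
  rw [List.getD_eq_getElem _ _ (by omega : 3 * j < (data.take N).length),
      List.getD_eq_getElem _ _ (by omega : 3 * j + 1 < (data.take N).length),
      List.getD_eq_getElem _ _ (by omega : 3 * j + 2 < (data.take N).length),
      List.getElem_take, List.getElem_take, List.getElem_take,
      List.getD_eq_getElem _ _ (by omega : 3 * j < data.length),
      List.getD_eq_getElem _ _ (by omega : 3 * j + 1 < data.length),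
      List.getD_eq_getElem _ _ (by omega : 3 * j + 2 < data.length)]

-- port A equals the canonical value (positive width)
theorem makebkgnd_A_canon (w' h' : Nat) (data : List Int) (hw : 0 < w')
    (hlen : 3 * w' * h' ≤ data.length) :
    makebkgnd (w' : Int) (h' : Int) data =
      ((w' : Int) * 2, (h' : Int) * 2, String.ofList (pvCanon w' h' (data.take (3 * w' * h')))) := by
  have houter : PySem.List.pyRange 0 (3 * (w' : Int) * (h' : Int)) (3 * (w' : Int))
      = (List.range h').map (fun k : Nat => 3 * (w' : Int) * (k : Int)) := by
    have h := pvRange_step (3 * w') h' (by omega)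
    rw [show ((3 * w' * h' : Nat) : Int) = 3 * (w' : Int) * (h' : Int) by push_cast; ring,
        show ((3 * w' : Nat) : Int) = 3 * (w' : Int) by push_cast; ring] at h
    rw [h]
  simp only [makebkgnd, houter, List.foldl_map]
  rw [PySem.List.foldl_append_eq_flatMap, List.nil_append]
  congr 2
  rw [pvFlatten_pairs, pvCanon]
  apply congrArg String.ofList
  apply List.flatMap_congr
  intro r hr
  have hrh : r < h' := List.mem_range.mp hr
  apply pvApp_congr
  rw [pvRange_inner _ w' hw, List.foldl_map, PySem.List.foldl_append_singleton_eq_map,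
      List.nil_append, ← List.flatMap_def, pvRow, List.range'_eq_map_range, List.flatMap_map]
  apply List.flatMap_congr
  intro c hc
  have hcw : c < w' := List.mem_range.mp hc
  have hp : 3 * (w' : Int) * (r : Int) + 3 * (c : Int) = ((3 * (w' * r + c) : Nat) : Int) := by
    push_cast; ring
  have hj : 3 * (w' * r + c) + 3 ≤ 3 * w' * h' := by nlinarith
  rw [hp, pvChunk, ← pvPix_eq data (3 * w' * h') (w' * r + c) hj hlen]

-- a width-6w slice out of the doubled-pixel stream is one doubled row
theorem pvRow_slice (pre : List Int) (w' h' r : Nat) (hr : r < h')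
    (hpre : pre.length = 3 * (w' * h')) :
    ((((List.range (w' * h')).flatMap (pvChunk pre)).drop (6 * (w' * r))).take (6 * w'))
      = pvRow pre w' r := by
  have hsplit : List.range (w' * h')
      = (List.range' 0 (w' * r) ++ List.range' (w' * r) w') ++ List.range' (w' * r + w') (w' * h' - (w' * r + w')) := by
    rw [List.range_eq_range']
    rw [show List.range' (w' * r) w' = List.range' (0 + 1 * (w' * r)) w' by norm_num,
        List.range'_append]
    rw [show List.range' (w' * r + w') (w' * h' - (w' * r + w')) = List.range' (0 + 1 * (w' * r + w')) (w' * h' - (w' * r + w')) by norm_num]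
    rw [List.range'_append]
    congr 1
    have : w' * r + w' ≤ w' * h' := by nlinarith
    omega
  have hlen6 : ∀ (l : List Nat), (∀ i ∈ l, i < w' * h') →
      ((l.flatMap (pvChunk pre)).length) = 6 * l.length := by
    intro l hl
    exact pvFlatMap_len 6 l _ (fun i hi => pvChunk_len pre i (by have := hl i hi; omega))
  have h1 : ((List.range' 0 (w' * r)).flatMap (pvChunk pre)).length = 6 * (w' * r) := by
    rw [hlen6 _ (fun i hi => by
      have := List.mem_range'_1.mp hi
      nlinarith [this.2])]
    simp
  have h2 : ((List.range' (w' * r) w').flatMap (pvChunk pre)).length = 6 * w' := by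
    rw [hlen6 _ (fun i hi => by
      have := List.mem_range'_1.mp hi
      nlinarith [this.2])]
    simp
  rw [hsplit, List.flatMap_append, List.flatMap_append, List.append_assoc,
      List.drop_left' h1, List.take_left' h2]
  rfl

-- port B equals the canonical value (positive case)
theorem makebkgnd_B_canon (w' h' : Nat) (data : List Int) (hw : 0 < w') (hh : 0 < h')
    (hlen : 3 * w' * h' ≤ data.length) :
    makebkgnd_alt (w' : Int) (h' : Int) data =
      ((w' : Int) * 2, (h' : Int) * 2, String.ofList (pvCanon w' h' (data.take (3 * w' * h')))) := by
  have hwi : (0 : Int) < (w' : Int) := by exact_mod_cast hw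
  have hhi : (0 : Int) < (h' : Int) := by exact_mod_cast hh
  simp only [makebkgnd_alt]
  rw [if_neg (by omega)]
  rw [show 3 * (w' : Int) * (h' : Int) = ((3 * w' * h' : Nat) : Int) by push_cast; ring,
      PySem.List.slice_to _ (by positivity), Int.toNat_natCast]
  set pre := data.take (3 * w' * h') with hpredef
  have hpre : pre.length = 3 * w' * h' := List.length_take_of_le hlen
  have hpre3 : pre.length = 3 * (w' * h') := by rw [hpre]; ring
  have hslen : ((pre.map (fun b : Int => pyChr (b >>> (3 : Nat)))).length) = 3 * w' * h' := by
    rw [List.length_map, hpre]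
  rw [hslen]
  have hr3 : PySem.List.pyRange 0 ((3 * w' * h' : Nat) : Int) 3
      = (List.range (w' * h')).map (fun k : Nat => ((3 : Nat) : Int) * (k : Int)) := by
    have h := pvRange_step 3 (w' * h') (by omega)
    rw [show ((3 * (w' * h') : Nat) : Int) = ((3 * w' * h' : Nat) : Int) by push_cast; ring,
        show ((3 : Nat) : Int) = (3 : Int) by norm_num] at h
    rw [← show ((3 : Nat) : Int) = (3 : Int) by norm_num] at h
    exact h
  rw [hr3, List.map_map]
  have hdoubled : ((List.range (w' * h')).map
      ((fun i => PySem.List.slice (pre.map (fun b : Int => pyChr (b >>> (3 : Nat)))) (some i) (some (i + 3)) ++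
                 PySem.List.slice (pre.map (fun b : Int => pyChr (b >>> (3 : Nat)))) (some i) (some (i + 3))) ∘
       (fun k : Nat => ((3 : Nat) : Int) * (k : Int)))).flatten
      = (List.range (w' * h')).flatMap (pvChunk pre) := by
    rw [← List.flatMap_def]
    apply List.flatMap_congr
    intro k hk
    simp only [Function.comp]
    rw [show ((3 : Nat) : Int) * (k : Int) = ((3 * k : Nat) : Int) by push_cast; ring,
        show ((3 * k : Nat) : Int) + 3 = ((3 * k : Nat) : Int) + ((3 : Nat) : Int) by norm_num,
        PySem.List.slice_natCast_add]
    rw [← List.map_drop, ← List.map_take]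
    rfl
  rw [hdoubled]
  have hdl : ((List.range (w' * h')).flatMap (pvChunk pre)).length = 6 * (w' * h') := by
    rw [pvFlatMap_len 6 _ _ (fun i hi => pvChunk_len pre i (by have := List.mem_range.mp hi; rw [hpre3]; omega))]
    simp
  rw [hdl]
  have hout : PySem.List.pyRange 0 ((6 * (w' * h') : Nat) : Int) (6 * (w' : Int))
      = (List.range h').map (fun r : Nat => ((6 * w' : Nat) : Int) * (r : Int)) := by
    have h := pvRange_step (6 * w') h' (by omega)
    rw [show ((6 * w' * h' : Nat) : Int) = ((6 * (w' * h') : Nat) : Int) by push_cast; ring,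
        show ((6 * w' : Nat) : Int) = 6 * (w' : Int) by push_cast; ring] at h
    rw [h]
    exact List.map_congr_left (fun k _ => by push_cast; ring)
  rw [hout, List.map_map]
  congr 2
  rw [← List.flatMap_def, pvCanon]
  apply congrArg String.ofList
  apply List.flatMap_congr
  intro r hr
  have hrh : r < h' := List.mem_range.mp hr
  simp only [Function.comp]
  rw [show ((6 * w' : Nat) : Int) * (r : Int) = ((6 * (w' * r) : Nat) : Int) by push_cast; ring,
      show ((6 * (w' * r) : Nat) : Int) + 6 * (w' : Int) = ((6 * (w' * r) : Nat) : Int) + ((6 * w' : Nat) : Int) by push_cast; ring,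
      PySem.List.slice_natCast_add]
  rw [pvRow_slice pre w' h' r hrh hpre3]

-- ===== VERDICT (by name: the statement is the Claim_ definition above) =====
theorem makebkgnd_spec : Claim_equal_makebkgnd := by
  unfold Claim_equal_makebkgnd
  intro w h_ data _hdom hpre
  unfold Spec_makebkgnd
  obtain ⟨hw0, hmain⟩ := hpre
  rcases lt_trichotomy w 0 with hw | hw | hw
  · -- negative width: every inner range is empty, both sides return the empty string
    have hB : makebkgnd_alt w h_ data = (w * 2, h_ * 2, "") := by
      simp only [makebkgnd_alt]
      rw [if_pos (Or.inl hw.le)]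
    rw [hB]
    simp only [makebkgnd, pvRange_inner_neg _ _ hw, List.foldl_nil, List.flatten_nil]
    rw [PySem.List.foldl_append_eq_flatMap, List.nil_append, pvFlatten_pairs]
    simp
  · exact absurd hw hw0
  · by_cases hh : h_ ≤ 0
    · -- nonpositive height: the outer range is empty on both sides
      have hB : makebkgnd_alt w h_ data = (w * 2, h_ * 2, "") := by
        simp only [makebkgnd_alt]
        rw [if_pos (Or.inr hh)]
      rw [hB]
      simp only [makebkgnd]
      rw [PySem.List.pyRange_of_pos _ _ (by omega : (0:Int) < 3 * w),
          if_neg (by intro hcon; nlinarith : ¬ (0 : Int) < 3 * w * h_)]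
      rfl
    · -- the real case: 0 < w, 0 < h
      have hh : 0 < h_ := by omega
      lift w to Nat using hw.le with w'
      lift h_ to Nat using hh.le with h'
      have hw' : 0 < w' := by exact_mod_cast hw
      have hh' : 0 < h' := by exact_mod_cast hh
      have hlen : 3 * w' * h' ≤ data.length := by
        exact_mod_cast (hmain hw hh).1
      rw [makebkgnd_A_canon w' h' data hw' hlen, makebkgnd_B_canon w' h' data hw' hh' hlen]
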